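-- pv_equiv track=rewrite | github.com/mjyt13/IB | Autetification_Distinction.py | get_alphabet_power
-- ===== SOURCE A (Python) =====
-- def get_alphabet_power(password):
--     """ Определение мощности алфавита на основе введенного пароля """
--     lower = upper = digits = special = 0
--     for char in password:
--         if char.isdigit():
--             digits = 10
--         elif char.islower():
--             lower = 26
--         elif char.isupper():
--             upper = 26
--         else:
--             special = 33
--
--     return lower + upper + digits + special
-- ===== SOURCE B (Python) =====
-- def get_alphabet_power(password):
--     """ Определение мощности алфавита на основе введенного пароля """
--     total = 0
--     if any(c.isdigit() for c in password):
--         total += 10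
--     if any(c.islower() for c in password):
--         total += 26
--     if any(c.isupper() for c in password):
--         total += 26
--     if any(not (c.isdigit() or c.islower() or c.isupper()) for c in password):
--         total += 33
--     return total
-- ===== Notes on version B (the rewrite author's own statement) =====
-- stated objective: idiomatic
-- what changed: Replaced the single stateful loop over four mutable counters with four independent any() existence scans, adding each class's contribution to a running total.
import Mathlib
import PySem

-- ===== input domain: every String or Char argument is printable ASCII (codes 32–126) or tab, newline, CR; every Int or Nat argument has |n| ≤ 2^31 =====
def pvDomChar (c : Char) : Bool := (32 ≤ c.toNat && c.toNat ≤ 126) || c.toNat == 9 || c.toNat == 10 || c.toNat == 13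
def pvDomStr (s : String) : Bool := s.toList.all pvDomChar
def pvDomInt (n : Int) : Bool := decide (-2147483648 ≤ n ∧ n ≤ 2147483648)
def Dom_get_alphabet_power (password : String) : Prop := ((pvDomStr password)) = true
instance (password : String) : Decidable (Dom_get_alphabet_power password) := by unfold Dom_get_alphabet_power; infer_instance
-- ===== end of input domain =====

-- B replaces the single stateful four-counter loop with four independent any() existence scans (idiomatic).


-- ===== PORT A =====
-- state (lower, upper, digits, special); the elif chain sets one slot to its constant
def gapStep (st : Int × Int × Int × Int) (c : Char) : Int × Int × Int × Int :=
  if PySem.Chars.isdigit c then (st.1, st.2.1, (10 : Int), st.2.2.2)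
  else if PySem.Chars.islower c then ((26 : Int), st.2.1, st.2.2.1, st.2.2.2)
  else if PySem.Chars.isupper c then (st.1, (26 : Int), st.2.2.1, st.2.2.2)
  else (st.1, st.2.1, st.2.2.1, (33 : Int))

def get_alphabet_power (password : String) : Int :=
  let st := password.toList.foldl gapStep (0, 0, 0, 0)
  st.1 + st.2.1 + st.2.2.1 + st.2.2.2

-- ===== PORT B =====
def get_alphabet_power_alt (password : String) : Int :=
  let cs := password.toList
  let t0 : Int := 0
  let t1 := if cs.any (fun c => PySem.Chars.isdigit c) then t0 + 10 else t0
  let t2 := if cs.any (fun c => PySem.Chars.islower c) then t1 + 26 else t1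
  let t3 := if cs.any (fun c => PySem.Chars.isupper c) then t2 + 26 else t2
  if cs.any (fun c => !(PySem.Chars.isdigit c || PySem.Chars.islower c || PySem.Chars.isupper c)) then t3 + 33 else t3

-- ===== PRECONDITION & SPEC =====
def Spec_get_alphabet_power (password : String) (out : Int) : Prop := out = get_alphabet_power_alt password
instance (password : String) (out : Int) : Decidable (Spec_get_alphabet_power password out) := by unfold Spec_get_alphabet_power; infer_instance

-- ===== CLAIM (what is proved, stated in full; the proofs are below) =====
def Claim_equal_get_alphabet_power : Prop := ∀ (password : String), Dom_get_alphabet_power password → Spec_get_alphabet_power password (get_alphabet_power password)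

-- ===== LEMMAS AND PROOFS =====

-- ===== VERDICT (by name: the statement is the Claim_ definition above) =====
-- each state slot ends at its constant iff some char of that class occurs, else keeps its start value
theorem gap_fold_char (cs : List Char) (l u d sp : Int) :
    cs.foldl gapStep (l, u, d, sp) =
      ((if cs.any (fun c => !PySem.Chars.isdigit c && PySem.Chars.islower c) then 26 else l),
       (if cs.any (fun c => !PySem.Chars.isdigit c && !PySem.Chars.islower c && PySem.Chars.isupper c) then 26 else u),
       (if cs.any (fun c => PySem.Chars.isdigit c) then 10 else d),
       (if cs.any (fun c => !(PySem.Chars.isdigit c || PySem.Chars.islower c || PySem.Chars.isupper c)) then 33 else sp)) := by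
  induction cs generalizing l u d sp with
  | nil => simp
  | cons c cs ih =>
    simp only [List.foldl_cons, List.any_cons, gapStep]
    by_cases hd : PySem.Chars.isdigit c <;>
      by_cases hl : PySem.Chars.islower c <;>
        by_cases hu : PySem.Chars.isupper c <;>
          simp [hd, hl, hu, ih]

-- ASCII class facts: a lowercase char is not a digit; an uppercase char is neither digit nor lowercase
theorem lower_not_digit (c : Char) : PySem.Chars.islower c → ¬ PySem.Chars.isdigit c := by
  simp [PySem.Chars.islower, PySem.Chars.isdigit, Char.le_def, UInt32.le_iff_toNat_le]
  intro h1 h2; omega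

theorem upper_not_digit_lower (c : Char) :
    PySem.Chars.isupper c → ¬ PySem.Chars.isdigit c ∧ ¬ PySem.Chars.islower c := by
  simp [PySem.Chars.islower, PySem.Chars.isupper, PySem.Chars.isdigit, Char.le_def,
    UInt32.le_iff_toNat_le]
  intro h1 h2; omega

theorem guard_lower (c : Char) :
    (!PySem.Chars.isdigit c && PySem.Chars.islower c) = PySem.Chars.islower c := by
  by_cases hl : PySem.Chars.islower c
  · simp [hl, lower_not_digit c hl]
  · simp [hl]

theorem guard_upper (c : Char) :
    (!PySem.Chars.isdigit c && !PySem.Chars.islower c && PySem.Chars.isupper c)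
      = PySem.Chars.isupper c := by
  by_cases hu : PySem.Chars.isupper c
  · obtain ⟨h1, h2⟩ := upper_not_digit_lower c hu
    simp [hu, h1, h2]
  · simp [hu]

theorem get_alphabet_power_spec : Claim_equal_get_alphabet_power := by
  intro password _
  show get_alphabet_power password = get_alphabet_power_alt password
  unfold get_alphabet_power get_alphabet_power_alt
  rw [gap_fold_char]
  simp only [guard_lower, guard_upper]
  by_cases hd : (password.toList.any (fun c => PySem.Chars.isdigit c)) <;>
    by_cases hl : (password.toList.any (fun c => PySem.Chars.islower c)) <;>
      by_cases hu : (password.toList.any (fun c => PySem.Chars.isupper c)) <;>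
        by_cases hs : (password.toList.any
            (fun c => !(PySem.Chars.isdigit c || PySem.Chars.islower c || PySem.Chars.isupper c))) <;>
          simp [hd, hl, hu]
  all_goals (split_ifs <;> norm_num)
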